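-- pv_equiv track=rewrite | github.com/0x7c2/cpme | logme.py | html_table_out
-- ===== SOURCE A (Python) =====
-- from operator import itemgetter
--
-- def html_category_descrpition(cat = ""):
-- 	categories = {}
-- 	categories["Firewall"] 		= "Specific things about FireWall-1 Product"
-- 	categories["GAiA"]		= "Operating System related stuff"
-- 	categories["CoreXL"]		= "CoreXL statistics, loadbalancing traffic over all configured cpus"
-- 	categories["Deployment Agent"]	= "Specific things from deployment agent, for example available updates"
-- 	categories["Filesystem"]	= "Local filesystem on this physical box"
-- 	categories["ClusterXL"]		= "Cluster related information"
-- 	categories["CPU"]		= "CPU usage, data obtained from cpview history"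
-- 	categories["Kernel"]		= "Firewall kernel related settings"
-- 	categories["Licensing"]		= "Most complex topic, check point licensing ;-)"
-- 	categories["Log Files"]		= "Try to find errors or any other warning in the log files"
-- 	categories["Memory"]		= "Memory usage and failed allocations, data obtained from cpview history"
-- 	categories["SecureXL"]		= "SecureXL configuration and statistics"
-- 	# ...
-- 	if cat == "":
-- 		return categories
-- 	else:
-- 		return categories[cat]
--
-- def html_table_header(cat):
-- 	html  = ""
-- 	html += "<a name='" + cat + "'></a> \n"
-- 	html += "<div class='container'> \n"
-- 	html += "<h2>" + cat + "</h2> \n"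
-- 	if cat in html_category_descrpition():
-- 		html += "<p>" + html_category_descrpition(cat) + "</p> \n"
-- 	html += "<table class='table'> \n"
-- 	html += " <thead> \n"
-- 	html += "  <tr class='d-flex'> \n"
-- 	html += "   <th class='col-7'>Topic</th> \n"
-- 	html += "   <th class='col-3'>Detail</th> \n"
-- 	html += "   <th class='col-2'>State</th> \n"
-- 	html += "  </tr> \n"
-- 	html += " </thead> \n"
-- 	html += " <tbody> \n"
-- 	return html
--
-- def html_table_footer():
-- 	html  = ""
-- 	html += " </tbody> \n"
-- 	html += "</table> \n"
-- 	html += "</div> \n"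
-- 	return html
--
-- def html_table_item(topic, detail, state):
-- 	formatme = " class='d-flex table-success "+state+"'"
-- 	if state == "WARN":
-- 		formatme = " class='d-flex table-warning "+state+"'"
-- 	if state == "FAIL":
-- 		formatme = " class='d-flex table-danger "+state+"'"
-- 	if state == "INFO":
-- 		formatme = " class='d-flex table-info "+state+"'"
-- 	html  = ""
-- 	html += "  <tr" + formatme + "> \n"
-- 	html += "   <td class='col-7'>" + topic + "</td> \n"
-- 	html += "   <td class='col-3'>" + detail + "</td> \n"
-- 	html += "   <td class='col-2'>" + state + "</td> \n"
-- 	html += "  </tr> \n"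
-- 	return html
--
-- def html_table_out(res):
-- 	html = ""
-- 	last = ""
-- 	sort_res = sorted(res, key=itemgetter(3))
-- 	for entry in sort_res:
-- 		category = entry[3]
-- 		topic    = entry[0]
-- 		detail   = entry[1]
-- 		state    = entry[2]
-- 		if last != category:
-- 			if last != "":
-- 				html += html_table_footer()
-- 			html += html_table_header(category)
-- 			last = category
-- 		html += html_table_item(topic, detail, state)
-- 	html += html_table_footer()
-- 	return html
-- ===== SOURCE B (Python) =====
-- CATEGORY_INFO = {
-- 	"Firewall":		"Specific things about FireWall-1 Product",
-- 	"GAiA":			"Operating System related stuff",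
-- 	"CoreXL":		"CoreXL statistics, loadbalancing traffic over all configured cpus",
-- 	"Deployment Agent":	"Specific things from deployment agent, for example available updates",
-- 	"Filesystem":		"Local filesystem on this physical box",
-- 	"ClusterXL":		"Cluster related information",
-- 	"CPU":			"CPU usage, data obtained from cpview history",
-- 	"Kernel":		"Firewall kernel related settings",
-- 	"Licensing":		"Most complex topic, check point licensing ;-)",
-- 	"Log Files":		"Try to find errors or any other warning in the log files",
-- 	"Memory":		"Memory usage and failed allocations, data obtained from cpview history",
-- 	"SecureXL":		"SecureXL configuration and statistics",
-- }
--
-- ROW_CLASS = {"WARN": "table-warning", "FAIL": "table-danger", "INFO": "table-info"}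
--
-- def render_group(cat, rows):
-- 	lines = [
-- 		"<a name='" + cat + "'></a>",
-- 		"<div class='container'>",
-- 		"<h2>" + cat + "</h2>",
-- 	]
-- 	if cat in CATEGORY_INFO:
-- 		lines.append("<p>" + CATEGORY_INFO[cat] + "</p>")
-- 	lines += [
-- 		"<table class='table'>",
-- 		" <thead>",
-- 		"  <tr class='d-flex'>",
-- 		"   <th class='col-7'>Topic</th>",
-- 		"   <th class='col-3'>Detail</th>",
-- 		"   <th class='col-2'>State</th>",
-- 		"  </tr>",
-- 		" </thead>",
-- 		" <tbody>",
-- 	]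
-- 	for topic, detail, state in rows:
-- 		lines += [
-- 			"  <tr class='d-flex " + ROW_CLASS.get(state, "table-success") + " " + state + "'>",
-- 			"   <td class='col-7'>" + topic + "</td>",
-- 			"   <td class='col-3'>" + detail + "</td>",
-- 			"   <td class='col-2'>" + state + "</td>",
-- 			"  </tr>",
-- 		]
-- 	lines += [" </tbody>", "</table>", "</div>"]
-- 	return " \n".join(lines) + " \n"
--
-- def html_table_out(res):
-- 	groups = {}
-- 	for topic, detail, state, cat in res:
-- 		groups.setdefault(cat, []).append((topic, detail, state))
-- 	return "".join(render_group(cat, groups[cat]) for cat in sorted(groups))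
-- ===== Notes on version B (the rewrite author's own statement) =====
-- stated objective: alternative
-- what changed: A sorts all rows and detects category changes with a 'last' sentinel while concatenating header/item/footer pieces built by +=; B groups rows into a dict in one pass, sorts only the distinct category keys, and renders each category independently as a list of lines joined at the end. Pre_ excludes rows whose category is the empty string: '' collides with A's '' loop sentinel, so A accidentally omits that group's header, a degenerate corner no caller produces.
-- intended difference: On empty res A returns a stray lone table footer (the footer is appended unconditionally after the loop), while B returns the empty string, the intended output when there are no rows to render. — e.g. on html_table_out([]): A returns " </tbody> \n</table> \n</div> \n", B returns ""
import Mathlib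
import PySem

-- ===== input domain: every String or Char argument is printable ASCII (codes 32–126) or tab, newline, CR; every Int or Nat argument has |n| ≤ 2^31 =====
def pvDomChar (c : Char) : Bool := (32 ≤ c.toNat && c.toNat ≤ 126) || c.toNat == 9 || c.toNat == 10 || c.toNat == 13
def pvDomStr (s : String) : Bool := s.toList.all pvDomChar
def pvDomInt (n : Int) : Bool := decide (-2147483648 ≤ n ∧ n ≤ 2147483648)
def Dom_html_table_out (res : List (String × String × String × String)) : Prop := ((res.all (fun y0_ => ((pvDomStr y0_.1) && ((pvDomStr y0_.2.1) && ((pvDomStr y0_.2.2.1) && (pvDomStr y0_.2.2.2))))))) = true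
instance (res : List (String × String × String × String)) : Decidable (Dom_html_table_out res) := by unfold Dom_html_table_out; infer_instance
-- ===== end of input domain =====

-- B replaces A's sort-all-rows-then-detect-category-changes concatenation loop by a one-pass
-- dict grouping, a sort of the distinct category keys only, and an independent per-category
-- renderer that builds a list of lines and joins them; equivalence of the RETURN value is
-- proved on nonempty inputs whose categories are all nonempty strings (Pre_/D_ below).

-- ===== PORT A =====
-- the module's category-description dict (data shared by both Pythons)
def pvCategories : PySem.Dict String String :=
  (((((((((((PySem.Dict.empty.insert
    "Firewall" "Specific things about FireWall-1 Product").insert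
    "GAiA" "Operating System related stuff").insert
    "CoreXL" "CoreXL statistics, loadbalancing traffic over all configured cpus").insert
    "Deployment Agent" "Specific things from deployment agent, for example available updates").insert
    "Filesystem" "Local filesystem on this physical box").insert
    "ClusterXL" "Cluster related information").insert
    "CPU" "CPU usage, data obtained from cpview history").insert
    "Kernel" "Firewall kernel related settings").insert
    "Licensing" "Most complex topic, check point licensing ;-)").insert
    "Log Files" "Try to find errors or any other warning in the log files").insert
    "Memory" "Memory usage and failed allocations, data obtained from cpview history").insert
    "SecureXL" "SecureXL configuration and statistics"

def pyTableHeader (cat : String) : String :=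
  let html := ""
  let html := html ++ "<a name='" ++ cat ++ "'></a> \n"
  let html := html ++ "<div class='container'> \n"
  let html := html ++ "<h2>" ++ cat ++ "</h2> \n"
  -- 'cat in categories' guards the lookup, so the Python KeyError is unreachable: getD "" is exact here
  let html := if pvCategories.contains cat then html ++ "<p>" ++ (pvCategories.get? cat).getD "" ++ "</p> \n" else html
  let html := html ++ "<table class='table'> \n"
  let html := html ++ " <thead> \n"
  let html := html ++ "  <tr class='d-flex'> \n"
  let html := html ++ "   <th class='col-7'>Topic</th> \n"
  let html := html ++ "   <th class='col-3'>Detail</th> \n"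
  let html := html ++ "   <th class='col-2'>State</th> \n"
  let html := html ++ "  </tr> \n"
  let html := html ++ " </thead> \n"
  let html := html ++ " <tbody> \n"
  html

def pyTableFooter : String :=
  let html := ""
  let html := html ++ " </tbody> \n"
  let html := html ++ "</table> \n"
  let html := html ++ "</div> \n"
  html

def pyTableItem (topic detail state : String) : String :=
  let formatme := " class='d-flex table-success " ++ state ++ "'"
  let formatme := if state = "WARN" then " class='d-flex table-warning " ++ state ++ "'" else formatme
  let formatme := if state = "FAIL" then " class='d-flex table-danger " ++ state ++ "'" else formatme
  let formatme := if state = "INFO" then " class='d-flex table-info " ++ state ++ "'" else formatme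
  let html := ""
  let html := html ++ "  <tr" ++ formatme ++ "> \n"
  let html := html ++ "   <td class='col-7'>" ++ topic ++ "</td> \n"
  let html := html ++ "   <td class='col-3'>" ++ detail ++ "</td> \n"
  let html := html ++ "   <td class='col-2'>" ++ state ++ "</td> \n"
  let html := html ++ "  </tr> \n"
  html

def html_table_out (res : List (String × String × String × String)) : String :=
  let sort_res := PySem.List.sorted res (fun e => e.2.2.2)
  let st := sort_res.foldl
    (fun (st : String × String) entry =>
      let category := entry.2.2.2
      let topic := entry.1
      let detail := entry.2.1
      let state := entry.2.2.1
      let hl :=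
        if st.2 ≠ category then
          ((if st.2 ≠ "" then st.1 ++ pyTableFooter else st.1) ++ pyTableHeader category, category)
        else (st.1, st.2)
      (hl.1 ++ pyTableItem topic detail state, hl.2))
    ("", "")
  st.1 ++ pyTableFooter

-- ===== PORT B =====
def pvRowClass : PySem.Dict String String :=
  ((PySem.Dict.empty.insert "WARN" "table-warning").insert
    "FAIL" "table-danger").insert "INFO" "table-info"

def pvRenderGroup (cat : String) (rows : List (String × String × String)) : String :=
  let lines : List String :=
    ["<a name='" ++ cat ++ "'></a>",
     "<div class='container'>",
     "<h2>" ++ cat ++ "</h2>"]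
  let lines := if pvCategories.contains cat
    then lines ++ ["<p>" ++ (pvCategories.get? cat).getD "" ++ "</p>"] else lines
  let lines := lines ++
    ["<table class='table'>",
     " <thead>",
     "  <tr class='d-flex'>",
     "   <th class='col-7'>Topic</th>",
     "   <th class='col-3'>Detail</th>",
     "   <th class='col-2'>State</th>",
     "  </tr>",
     " </thead>",
     " <tbody>"]
  let lines := rows.foldl
    (fun ls r =>
      ls ++ ["  <tr class='d-flex " ++ (pvRowClass.get? r.2.2).getD "table-success" ++ " " ++ r.2.2 ++ "'>",
             "   <td class='col-7'>" ++ r.1 ++ "</td>",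
             "   <td class='col-3'>" ++ r.2.1 ++ "</td>",
             "   <td class='col-2'>" ++ r.2.2 ++ "</td>",
             "  </tr>"]) lines
  let lines := lines ++ [" </tbody>", "</table>", "</div>"]
  PySem.Str.join " \n" lines ++ " \n"

def html_table_out_alt (res : List (String × String × String × String)) : String :=
  let groups : PySem.Dict String (List (String × String × String)) :=
    res.foldl
      (fun g e => g.insert e.2.2.2 (((g.get? e.2.2.2).getD []) ++ [(e.1, e.2.1, e.2.2.1)]))
      PySem.Dict.empty
  PySem.Str.join ""
    ((PySem.List.sorted groups.keys (fun k => k)).map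
      (fun cat => pvRenderGroup cat ((groups.get? cat).getD [])))

-- ===== PRECONDITION & SPEC =====
-- Pre_ excludes rows whose category (4th component) is the empty string: "" collides with A's
-- last = "" loop sentinel, a degenerate corner where A omits that group's header while B emits
-- the (empty-named) header — both readings are defensible, no caller produces an empty category.
def Pre_html_table_out (res : List (String × String × String × String)) : Prop :=
  ∀ e ∈ res, e.2.2.2 ≠ ""
instance (res : List (String × String × String × String)) : Decidable (Pre_html_table_out res) := by
  unfold Pre_html_table_out; infer_instance
def pvWitness_html_table_out : (List (String × String × String × String)) :=
  [("fw rule hit", "ok", "PASS", "Firewall"), ("cpu load", "high", "WARN", "CPU")]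

-- On empty res A returns a stray lone table footer (appended unconditionally after its loop);
-- B returns the empty string, the intended output when there are no rows to render.
def D_html_table_out (res : List (String × String × String × String)) : Prop := res = []
instance (res : List (String × String × String × String)) : Decidable (D_html_table_out res) := by
  unfold D_html_table_out; infer_instance

def Spec_html_table_out (res : List (String × String × String × String)) (out : String) : Prop :=
  ¬ D_html_table_out res → out = html_table_out_alt res
instance (res : List (String × String × String × String)) (out : String) : Decidable (Spec_html_table_out res out) := by unfold Spec_html_table_out; infer_instance

def pvDiffWitness_html_table_out : (List (String × String × String × String)) := []
def pvDiffWitnessOut_html_table_out : String × String := (" </tbody> \n</table> \n</div> \n", "")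

-- ===== CLAIM (what is proved, stated in full; the proofs are below) =====
def Claim_unchanged_html_table_out : Prop := ∀ (res : List (String × String × String × String)), Dom_html_table_out res → Pre_html_table_out res → Spec_html_table_out res (html_table_out res)
def Claim_changed_html_table_out : Prop := Dom_html_table_out (pvDiffWitness_html_table_out) ∧ Pre_html_table_out (pvDiffWitness_html_table_out) ∧ D_html_table_out (pvDiffWitness_html_table_out) ∧ html_table_out (pvDiffWitness_html_table_out) = pvDiffWitnessOut_html_table_out.1 ∧ html_table_out_alt (pvDiffWitness_html_table_out) = pvDiffWitnessOut_html_table_out.2 ∧ pvDiffWitnessOut_html_table_out.1 ≠ pvDiffWitnessOut_html_table_out.2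
def Claim_exact_html_table_out : Prop := ∀ (res : List (String × String × String × String)), Dom_html_table_out res → Pre_html_table_out res → D_html_table_out res → html_table_out res ≠ html_table_out_alt res

-- ===== LEMMAS AND PROOFS =====

-- proof-side abbreviations
def pvKey (e : String × String × String × String) : String := e.2.2.2
def pvProj (e : String × String × String × String) : String × String × String := (e.1, e.2.1, e.2.2.1)
def pvItemOf (e : String × String × String × String) : String := pyTableItem e.1 e.2.1 e.2.2.1
def pvFilter (res : List (String × String × String × String)) (c : String) :
    List (String × String × String × String) :=
  res.filter (fun e => pvKey e == c)
def pvConcat (l : List String) : String := l.foldr (· ++ ·) ""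
def pvItems (b : List (String × String × String × String)) : String := pvConcat (b.map pvItemOf)
def pvChunk (s : List (String × String × String × String)) (c : String) : String :=
  pyTableHeader c ++ pvItems (pvFilter s c) ++ pyTableFooter
def pvChunks (s : List (String × String × String × String)) (ds : List String) : String :=
  (ds.map (pvChunk s)).foldr (· ++ ·) ""
def pvTail (s : List (String × String × String × String)) (last : String) (ds : List String) : String :=
  match ds with
  | [] => pyTableFooter
  | c :: ds' =>
      (if last = "" then "" else pyTableFooter) ++ pyTableHeader c ++ pvItems (pvFilter s c) ++ pvTail s c ds'
-- A's loop body and B's grouping step, named for the lemmas (definitionally the lambdas in the ports)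
def pvF (st : String × String) (entry : String × String × String × String) : String × String :=
  let category := entry.2.2.2
  let topic := entry.1
  let detail := entry.2.1
  let state := entry.2.2.1
  let hl :=
    if st.2 ≠ category then
      ((if st.2 ≠ "" then st.1 ++ pyTableFooter else st.1) ++ pyTableHeader category, category)
    else (st.1, st.2)
  (hl.1 ++ pyTableItem topic detail state, hl.2)
def pvStep (g : PySem.Dict String (List (String × String × String)))
    (e : String × String × String × String) : PySem.Dict String (List (String × String × String)) :=
  g.insert e.2.2.2 (((g.get? e.2.2.2).getD []) ++ [(e.1, e.2.1, e.2.2.1)])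
-- B's per-row five lines
def pvRowLines (r : String × String × String) : List String :=
  ["  <tr class='d-flex " ++ (pvRowClass.get? r.2.2).getD "table-success" ++ " " ++ r.2.2 ++ "'>",
   "   <td class='col-7'>" ++ r.1 ++ "</td>",
   "   <td class='col-3'>" ++ r.2.1 ++ "</td>",
   "   <td class='col-2'>" ++ r.2.2 ++ "</td>",
   "  </tr>"]
-- suffix every line with " \n" and concatenate
def pvSfx (l : List String) : String := pvConcat (l.map (fun s => s ++ " \n"))

theorem pv_join_nil : PySem.Str.join "" ([] : List String) = "" := by decide

theorem pv_join_cons (p : String) (ps : List String) :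
    PySem.Str.join "" (p :: ps) = p ++ PySem.Str.join "" ps := by
  cases ps with
  | nil =>
      apply String.toList_inj.mp
      simp [PySem.Str.join, PySem.Chars.join_singleton, PySem.Chars.join_nil]
  | cons q rest =>
      apply String.toList_inj.mp
      rw [String.toList_append]
      simp only [PySem.Str.join, List.map_cons, String.toList_ofList]
      rw [PySem.Chars.join_cons_cons]
      simp

theorem pv_join_eq_concat (ps : List String) : PySem.Str.join "" ps = pvConcat ps := by
  induction ps with
  | nil => simpa [pvConcat] using pv_join_nil
  | cons p ps ih => rw [pv_join_cons, ih]; simp [pvConcat]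

theorem pv_join_lines (ls : List String) (hne : ls ≠ []) :
    PySem.Str.join " \n" ls ++ " \n" = pvSfx ls := by
  induction ls with
  | nil => exact absurd rfl hne
  | cons a t ih =>
      cases t with
      | nil =>
          have h1 : PySem.Str.join " \n" [a] = a := by
            apply String.toList_inj.mp
            simp [PySem.Str.join, PySem.Chars.join_singleton]
          rw [h1]
          simp [pvSfx, pvConcat]
      | cons b t' =>
          have h1 : PySem.Str.join " \n" (a :: b :: t') = a ++ " \n" ++ PySem.Str.join " \n" (b :: t') := by
            apply String.toList_inj.mp
            simp only [String.toList_append, PySem.Str.join, List.map_cons, String.toList_ofList]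
            rw [PySem.Chars.join_cons_cons]
          rw [h1, String.append_assoc, String.append_assoc, ih (by simp)]
          simp [pvSfx, pvConcat, String.append_assoc]

theorem pv_sfx_append (l1 l2 : List String) : pvSfx (l1 ++ l2) = pvSfx l1 ++ pvSfx l2 := by
  induction l1 with
  | nil => simp [pvSfx, pvConcat]
  | cons x l ih =>
      simp only [List.cons_append, pvSfx, List.map_cons, pvConcat, List.foldr_cons] at ih ⊢
      rw [ih]
      simp [String.append_assoc]

theorem pv_foldl_lines (rows : List (String × String × String)) (init : List String) :
    rows.foldl (fun ls r => ls ++ pvRowLines r) init = init ++ rows.flatMap pvRowLines := by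
  induction rows generalizing init with
  | nil => simp
  | cons r rows ih => rw [List.foldl_cons, ih, List.flatMap_cons, List.append_assoc]

theorem pv_rowlines_item (r : String × String × String) :
    pvSfx (pvRowLines r) = pyTableItem r.1 r.2.1 r.2.2 := by
  obtain ⟨t, d, s⟩ := r
  by_cases h1 : s = "WARN"
  · subst h1; simp only [pvSfx, pvRowLines, pyTableItem, pvConcat]
    simp only [List.map_cons, List.map_nil, List.foldr_cons, List.foldr_nil]
    simp [String.append_assoc]; rfl
  · by_cases h2 : s = "FAIL"
    · subst h2; simp only [pvSfx, pvRowLines, pyTableItem, pvConcat]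
      simp only [List.map_cons, List.map_nil, List.foldr_cons, List.foldr_nil]
      simp [String.append_assoc]; rfl
    · by_cases h3 : s = "INFO"
      · subst h3; simp only [pvSfx, pvRowLines, pyTableItem, pvConcat]
        simp only [List.map_cons, List.map_nil, List.foldr_cons, List.foldr_nil]
        simp [String.append_assoc]; rfl
      · have hget : (pvRowClass.get? s).getD "table-success" = "table-success" := by
          have : pvRowClass.get? s = none := by
            simp only [pvRowClass, PySem.Dict.get?_insert_of_ne _ _ h3,
              PySem.Dict.get?_insert_of_ne _ _ h2,
              PySem.Dict.get?_insert_of_ne _ _ h1]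
            exact PySem.Dict.get?_empty s
          rw [this]; rfl
        simp only [pvSfx, pvRowLines, pyTableItem, pvConcat, hget]
        simp only [List.map_cons, List.map_nil, List.foldr_cons, List.foldr_nil]
        simp only [if_neg h1, if_neg h2, if_neg h3]
        simp only [String.append_assoc]
        rfl

set_option maxRecDepth 16384 in
theorem pv_render_eq (cat : String) (rows : List (String × String × String)) :
    pvRenderGroup cat rows
      = pyTableHeader cat ++ pvConcat (rows.map (fun r => pyTableItem r.1 r.2.1 r.2.2)) ++ pyTableFooter := by
  show PySem.Str.join " \n" _ ++ " \n" = _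
  have hfun : (fun (ls : List String) (r : String × String × String) =>
      ls ++ ["  <tr class='d-flex " ++ (pvRowClass.get? r.2.2).getD "table-success" ++ " " ++ r.2.2 ++ "'>",
             "   <td class='col-7'>" ++ r.1 ++ "</td>",
             "   <td class='col-3'>" ++ r.2.1 ++ "</td>",
             "   <td class='col-2'>" ++ r.2.2 ++ "</td>",
             "  </tr>"]) = (fun ls r => ls ++ pvRowLines r) := rfl
  rw [hfun, pv_foldl_lines]
  rw [pv_join_lines _ (by split_ifs <;> simp)]
  rw [pv_sfx_append, pv_sfx_append]
  have hitems : pvSfx (rows.flatMap pvRowLines)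
      = pvConcat (rows.map (fun r => pyTableItem r.1 r.2.1 r.2.2)) := by
    induction rows with
    | nil => simp [pvSfx, pvConcat]
    | cons r rows ih =>
        rw [List.flatMap_cons, pv_sfx_append, ih, pv_rowlines_item]
        simp [pvConcat]
  have hfoot : pvSfx [" </tbody>", "</table>", "</div>"] = pyTableFooter := by
    simp [pvSfx, pvConcat, pyTableFooter]
  have hhead : pvSfx (((if pvCategories.contains cat
        then ["<a name='" ++ cat ++ "'></a>", "<div class='container'>", "<h2>" ++ cat ++ "</h2>"]
          ++ ["<p>" ++ (pvCategories.get? cat).getD "" ++ "</p>"]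
        else ["<a name='" ++ cat ++ "'></a>", "<div class='container'>", "<h2>" ++ cat ++ "</h2>"]) ++
        ["<table class='table'>", " <thead>", "  <tr class='d-flex'>",
         "   <th class='col-7'>Topic</th>", "   <th class='col-3'>Detail</th>",
         "   <th class='col-2'>State</th>", "  </tr>", " </thead>", " <tbody>"]))
      = pyTableHeader cat := by
    simp only [pyTableHeader]
    split_ifs with hc
    · simp only [pvSfx, pvConcat, List.map_append, List.map_cons, List.map_nil,
        List.foldr_append, List.foldr_cons, List.foldr_nil]
      simp only [String.append_assoc]
      rfl
    · simp only [pvSfx, pvConcat, List.map_append, List.map_cons, List.map_nil,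
        List.foldr_append, List.foldr_cons, List.foldr_nil]
      simp only [String.append_assoc]
      rfl
  rw [hitems, hfoot, hhead, String.append_assoc]

theorem pv_insertBy_filter (x : String × String × String × String)
    (ys : List (String × String × String × String)) (c : String)
    (hs : ys.Pairwise (fun a b => pvKey a ≤ pvKey b)) :
    (PySem.List.insertBy (fun a b => decide (pvKey a < pvKey b)) x ys).filter (fun e => pvKey e == c)
      = ys.filter (fun e => pvKey e == c) ++ if pvKey x == c then [x] else [] := by
  induction ys with
  | nil =>
      rw [PySem.List.insertBy.eq_1]
      by_cases h : pvKey x = c <;> simp [h]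
  | cons y ys ih =>
      rw [List.pairwise_cons] at hs
      obtain ⟨hy, hs'⟩ := hs
      rw [PySem.List.insertBy.eq_2]
      by_cases hlt : pvKey x < pvKey y
      · simp only [hlt, decide_true, if_true]
        by_cases hxc : pvKey x = c
        · have hnone : (y :: ys).filter (fun e => pvKey e == c) = [] := by
            rw [List.filter_eq_nil_iff]
            intro z hz
            rcases List.mem_cons.mp hz with rfl | hz'
            · simp only [beq_iff_eq]; intro h
              rw [h, ← hxc] at hlt; exact lt_irrefl _ hlt
            · simp only [beq_iff_eq]; intro h
              have h2 := lt_of_lt_of_le hlt (hy z hz')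
              rw [h, ← hxc] at h2; exact lt_irrefl _ h2
          rw [List.filter_cons_of_pos (by simpa using hxc), hnone]
          simp [hxc]
        · rw [List.filter_cons_of_neg (by simpa using hxc)]
          simp [hxc]
      · simp only [hlt, decide_false, Bool.false_eq_true, if_false]
        rw [List.filter_cons, List.filter_cons, ih hs']
        by_cases hyc : pvKey y == c <;> simp [hyc]

theorem pv_sorted_filter (res : List (String × String × String × String)) (c : String) :
    pvFilter (PySem.List.sorted res pvKey) c = pvFilter res c := by
  induction res using List.reverseRecOn with
  | nil => rfl
  | append_singleton l x ih =>
      have h1 : PySem.List.sorted (l ++ [x]) pvKey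
          = PySem.List.insertBy (fun a b => decide (pvKey a < pvKey b)) x (PySem.List.sorted l pvKey) := by
        rw [PySem.List.sorted_eq_foldl_insertBy, List.foldl_append,
          ← PySem.List.sorted_eq_foldl_insertBy]
        rfl
      unfold pvFilter at *
      rw [h1, pv_insertBy_filter _ _ _ (PySem.List.sorted_pairwise l pvKey), ih,
        List.filter_append]
      congr 1
      by_cases h : pvKey x = c <;> simp [h]

theorem pv_keys_groups_aux (res : List (String × String × String × String))
    (g : PySem.Dict String (List (String × String × String))) :
    (res.foldl pvStep g).keys = PySem.Set.update g.keys (res.map pvKey) := by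
  induction res generalizing g with
  | nil => simp [PySem.Set.update_nil]
  | cons e res ih =>
      rw [List.foldl_cons, ih, List.map_cons, PySem.Set.update_cons]
      congr 1
      by_cases hc : g.contains e.2.2.2
      · have h1 : (pvStep g e).keys = g.keys := PySem.Dict.keys_insert_of_contains _ _ hc
        have h2 : PySem.Set.add g.keys (pvKey e) = g.keys :=
          PySem.Set.add_of_mem ((PySem.Dict.contains_iff_mem_keys g _).mp hc)
        rw [h1, h2]
      · have h1 : (pvStep g e).keys = g.keys ++ [e.2.2.2] :=
          PySem.Dict.keys_insert_of_not_contains _ _ (by simpa using hc)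
        have h2 : PySem.Set.add g.keys (pvKey e) = g.keys ++ [pvKey e] :=
          PySem.Set.add_of_not_mem (fun hm => hc ((PySem.Dict.contains_iff_mem_keys g _).mpr hm))
        rw [h1, h2]; rfl

theorem pv_keys_groups (res : List (String × String × String × String)) :
    (res.foldl pvStep PySem.Dict.empty).keys = PySem.Set.ofList (res.map pvKey) := by
  rw [pv_keys_groups_aux, PySem.Dict.keys_empty, PySem.Set.update_nil_left]

theorem pv_get?_groups (res : List (String × String × String × String))
    (g : PySem.Dict String (List (String × String × String))) (c : String) :
    (res.foldl pvStep g).get? c =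
      if (pvFilter res c).isEmpty then g.get? c
      else some (((g.get? c).getD []) ++ (pvFilter res c).map pvProj) := by
  induction res generalizing g with
  | nil => simp [pvFilter]
  | cons e res ih =>
      rw [List.foldl_cons, ih]
      by_cases hec : pvKey e = c
      · have hfc : pvFilter (e :: res) c = e :: pvFilter res c := by
          unfold pvFilter; rw [List.filter_cons_of_pos (by simpa using hec)]
        have hg' : (pvStep g e).get? c = some (((g.get? c).getD []) ++ [pvProj e]) := by
          unfold pvStep
          rw [show e.2.2.2 = c from hec, PySem.Dict.get?_insert_self]
          rfl
        rw [hfc, hg']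
        by_cases hemp : (pvFilter res c).isEmpty
        · simp [List.isEmpty_iff.mp hemp, pvProj]
        · simp [hemp, pvProj]
      · have hfc : pvFilter (e :: res) c = pvFilter res c := by
          unfold pvFilter; rw [List.filter_cons_of_neg (by simpa using hec)]
        have hg' : (pvStep g e).get? c = g.get? c := by
          unfold pvStep
          exact PySem.Dict.get?_insert_of_ne _ _ (fun h => hec h.symm)
        rw [hfc, hg']

theorem pv_flat_blocks (ds : List String) (s : List (String × String × String × String))
    (hds : ds.Pairwise (· < ·)) (hs : s.Pairwise (fun a b => pvKey a ≤ pvKey b))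
    (hmem : ∀ e ∈ s, pvKey e ∈ ds) :
    ds.flatMap (fun c => pvFilter s c) = s := by
  induction ds generalizing s with
  | nil =>
      have : s = [] := by
        cases s with
        | nil => rfl
        | cons e s' => exact absurd (hmem e (List.mem_cons_self)) (List.not_mem_nil)
      simp [this]
  | cons c ds' ih =>
      rw [List.pairwise_cons] at hds
      obtain ⟨hclt, hds'⟩ := hds
      have hsplit := (List.takeWhile_append_dropWhile (p := fun e => pvKey e == c) (l := s)).symm
      set t := s.takeWhile (fun e => pvKey e == c) with ht
      set d := s.dropWhile (fun e => pvKey e == c) with hd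
      have htake : ∀ e ∈ t, pvKey e = c := by
        intro e he; simpa using List.mem_takeWhile_imp he
      have hdpair : d.Pairwise (fun a b => pvKey a ≤ pvKey b) :=
        List.Pairwise.sublist (List.dropWhile_sublist _) hs
      have hdmem : ∀ e ∈ d, pvKey e ∈ c :: ds' := fun e he =>
        hmem e ((List.dropWhile_sublist _).subset he)
      have hdrop_ne : ∀ e ∈ d, pvKey e ≠ c := by
        cases hdd : d with
        | nil => intro e he; exact absurd he (List.not_mem_nil)
        | cons h0 t0 =>
            have hh0 : ¬ (pvKey h0 == c) := by
              have := List.head?_dropWhile_not (fun e => pvKey e == c) s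
              rw [← hd, hdd] at this
              simpa using this
            have hh0' : pvKey h0 ≠ c := by simpa using hh0
            have hh0mem : pvKey h0 ∈ ds' := by
              rcases List.mem_cons.mp (hdmem h0 (by rw [hdd]; exact List.mem_cons_self)) with h | h
              · exact absurd h hh0'
              · exact h
            have hcl : c < pvKey h0 := hclt _ hh0mem
            intro e he heq
            rcases List.mem_cons.mp he with rfl | he'
            · exact hh0' heq
            · rw [hdd] at hdpair
              rw [List.pairwise_cons] at hdpair
              have := hdpair.1 e he'
              rw [heq] at this
              exact absurd (lt_of_lt_of_le hcl this) (lt_irrefl _)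
      have hfilc : pvFilter s c = t := by
        rw [pvFilter, hsplit, List.filter_append]
        rw [List.filter_eq_self.mpr (fun e he => by simpa using htake e he),
          List.filter_eq_nil_iff.mpr (fun e he => by simpa using hdrop_ne e he),
          List.append_nil]
      have hfild : ∀ c' ∈ ds', pvFilter s c' = pvFilter d c' := by
        intro c' hc'
        have hcc' : c ≠ c' := ne_of_lt (hclt _ hc')
        rw [pvFilter, hsplit, List.filter_append, pvFilter]
        rw [List.filter_eq_nil_iff.mpr (fun e he => by
          have := htake e he
          simp only [beq_iff_eq]
          rw [this]; exact hcc'), List.nil_append]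
      have hdmem' : ∀ e ∈ d, pvKey e ∈ ds' := by
        intro e he
        rcases List.mem_cons.mp (hdmem e he) with h | h
        · exact absurd h (hdrop_ne e he)
        · exact h
      rw [List.flatMap_cons, hfilc]
      have : ds'.flatMap (fun c' => pvFilter s c') = ds'.flatMap (fun c' => pvFilter d c') := by
        exact List.flatMap_congr hfild
      rw [this, ih d hds' hdpair hdmem']
      exact hsplit.symm

theorem pv_run (b : List (String × String × String × String)) (c h : String)
    (hb : ∀ e ∈ b, pvKey e = c) :
    b.foldl pvF (h, c) = (h ++ pvItems b, c) := by
  induction b generalizing h with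
  | nil => simp [pvItems, pvConcat]
  | cons e b' ih =>
      rw [List.foldl_cons]
      have hce : pvF (h, c) e = (h ++ pvItemOf e, c) := by
        have hc := hb e List.mem_cons_self
        simp [pvF, ← hc, pvKey, pvItemOf]
      rw [hce, ih _ (fun e2 he2 => hb e2 (List.mem_cons_of_mem _ he2))]
      simp [pvItems, pvConcat, String.append_assoc]

theorem pv_block (b : List (String × String × String × String)) (c h last : String)
    (hb : ∀ e ∈ b, pvKey e = c) (hne : b ≠ []) (hlast : last ≠ c) :
    b.foldl pvF (h, last) =
      ((if last = "" then h else h ++ pyTableFooter) ++ pyTableHeader c ++ pvItems b, c) := by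
  cases b with
  | nil => exact absurd rfl hne
  | cons e b' =>
      rw [List.foldl_cons]
      have hce : pvF (h, last) e =
          ((if last = "" then h else h ++ pyTableFooter) ++ pyTableHeader c ++ pvItemOf e, c) := by
        have hc := hb e List.mem_cons_self
        simp only [pvF, pvKey] at *
        rw [hc, if_pos hlast]
        by_cases hl0 : last = "" <;> simp [hl0, String.append_assoc, pvItemOf]
      rw [hce, pv_run b' c _ (fun e' he' => hb e' (List.mem_cons_of_mem _ he'))]
      simp [pvItems, pvConcat, String.append_assoc]

theorem pv_loop (ds : List String) (s : List (String × String × String × String))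
    (h last : String) (hds : ds.Pairwise (· < ·))
    (hne : ∀ c ∈ ds, pvFilter s c ≠ []) (hlast : last ∉ ds) :
    ((ds.flatMap (fun c => pvFilter s c)).foldl pvF (h, last)).1 ++ pyTableFooter
      = h ++ pvTail s last ds := by
  induction ds generalizing h last with
  | nil => simp [pvTail]
  | cons c ds' ih =>
      rw [List.pairwise_cons] at hds
      obtain ⟨hclt, hds'⟩ := hds
      rw [List.flatMap_cons, List.foldl_append]
      have hbk : ∀ e ∈ pvFilter s c, pvKey e = c := by
        intro e he
        have := List.of_mem_filter he
        simpa using this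
      rw [pv_block (pvFilter s c) c h last hbk (hne c List.mem_cons_self)
        (fun hcl => hlast (hcl ▸ List.mem_cons_self))]
      rw [ih _ c hds' (fun c' hc' => hne c' (List.mem_cons_of_mem _ hc'))
        (fun hm => absurd (hclt c hm) (lt_irrefl c))]
      show _ = h ++ pvTail s last (c :: ds')
      rw [pvTail]
      by_cases hl0 : last = "" <;> simp [hl0, String.append_assoc, String.empty_append]

theorem pv_tail_chunks (s : List (String × String × String × String)) (last : String)
    (ds : List String) (hlast : last ≠ "") (hds : ∀ c ∈ ds, c ≠ "") :
    pvTail s last ds = pyTableFooter ++ pvChunks s ds := by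
  induction ds generalizing last with
  | nil => simp [pvTail, pvChunks]
  | cons c ds' ih =>
      rw [pvTail, if_neg hlast, ih c (hds c List.mem_cons_self)
        (fun c' hc' => hds c' (List.mem_cons_of_mem _ hc'))]
      simp [pvChunks, pvChunk, String.append_assoc]

theorem pv_tail_empty_last (s : List (String × String × String × String)) (c : String)
    (ds : List String) (hc : c ≠ "") (hds : ∀ c' ∈ ds, c' ≠ "") :
    pvTail s "" (c :: ds) = pvChunks s (c :: ds) := by
  rw [pvTail, if_pos rfl, pv_tail_chunks s c ds hc hds]
  simp [pvChunks, pvChunk, String.append_assoc, String.empty_append]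

-- ===== VERDICT (by name: the statement is the Claim_ definition above) =====
theorem html_table_out_spec : Claim_unchanged_html_table_out := by
  intro res _ hpre hnd
  show html_table_out res = html_table_out_alt res
  have hres : res ≠ [] := hnd
  have hlt : (PySem.List.sorted (PySem.Set.ofList (res.map pvKey)) (fun k => k)).Pairwise (· < ·) :=
    PySem.List.sorted_ofList_pairwise_lt _
  have hsp : (PySem.List.sorted res pvKey).Pairwise (fun a b => pvKey a ≤ pvKey b) :=
    PySem.List.sorted_pairwise res pvKey
  have hmem : ∀ e ∈ PySem.List.sorted res pvKey,
      pvKey e ∈ PySem.List.sorted (PySem.Set.ofList (res.map pvKey)) (fun k => k) := by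
    intro e he
    rw [PySem.List.mem_sorted, PySem.Set.mem_ofList]
    exact List.mem_map_of_mem ((PySem.List.mem_sorted res pvKey false e).mp he)
  have hne : ∀ c ∈ PySem.List.sorted (PySem.Set.ofList (res.map pvKey)) (fun k => k),
      pvFilter (PySem.List.sorted res pvKey) c ≠ [] := by
    intro c hc
    rw [PySem.List.mem_sorted, PySem.Set.mem_ofList] at hc
    obtain ⟨e, he, hke⟩ := List.mem_map.mp hc
    rw [pv_sorted_filter]
    intro h0
    have hmem2 : e ∈ pvFilter res c := List.mem_filter.mpr ⟨he, by simp [hke]⟩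
    rw [h0] at hmem2
    exact absurd hmem2 (List.not_mem_nil)
  have hcne : ∀ c ∈ PySem.List.sorted (PySem.Set.ofList (res.map pvKey)) (fun k => k), c ≠ "" := by
    intro c hc
    rw [PySem.List.mem_sorted, PySem.Set.mem_ofList] at hc
    obtain ⟨e, he, hke⟩ := List.mem_map.mp hc
    exact hke ▸ hpre e he
  have hflat : (PySem.List.sorted (PySem.Set.ofList (res.map pvKey)) (fun k => k)).flatMap
      (fun c => pvFilter (PySem.List.sorted res pvKey) c) = PySem.List.sorted res pvKey :=
    pv_flat_blocks _ _ hlt hsp hmem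
  -- A side
  have hA1 : html_table_out res =
      ((PySem.List.sorted res pvKey).foldl pvF ("", "")).1 ++ pyTableFooter := rfl
  have hA2 : html_table_out res
      = "" ++ pvTail (PySem.List.sorted res pvKey) ""
          (PySem.List.sorted (PySem.Set.ofList (res.map pvKey)) (fun k => k)) := by
    have hA2' := pv_loop _ _ "" "" hlt hne (fun hm => hcne "" hm rfl)
    rw [hflat] at hA2'
    exact hA1.trans hA2'
  -- B side
  have hkeys := pv_keys_groups res
  have hB1 : html_table_out_alt res =
      PySem.Str.join ""
        ((PySem.List.sorted (res.foldl pvStep PySem.Dict.empty).keys (fun k => k)).map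
          (fun cat => pvRenderGroup cat (((res.foldl pvStep PySem.Dict.empty).get? cat).getD []))) := rfl
  rw [hkeys] at hB1
  have hparts : ∀ c ∈ PySem.List.sorted (PySem.Set.ofList (res.map pvKey)) (fun k => k),
      pvRenderGroup c (((res.foldl pvStep PySem.Dict.empty).get? c).getD [])
        = pvChunk (PySem.List.sorted res pvKey) c := by
    intro c hc
    have hget : ((res.foldl pvStep PySem.Dict.empty).get? c).getD []
        = (pvFilter res c).map pvProj := by
      rw [pv_get?_groups, PySem.Dict.get?_empty]
      have hnonempty : (pvFilter res c).isEmpty = false := by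
        rw [List.isEmpty_eq_false_iff]
        rw [← pv_sorted_filter]
        exact hne c hc
      rw [hnonempty]
      simp
    rw [hget, pv_render_eq, List.map_map, ← pv_sorted_filter res c]
    rfl
  rw [List.map_congr_left hparts, pv_join_eq_concat] at hB1
  -- finish by cases on the sorted distinct categories, nonempty since res ≠ []
  rw [hA2, hB1]
  cases hcats : PySem.List.sorted (PySem.Set.ofList (res.map pvKey)) (fun k => k) with
  | nil =>
      exfalso
      cases res with
      | nil => exact hres rfl
      | cons e res' =>
          have : pvKey e ∈ PySem.List.sorted (PySem.Set.ofList ((e :: res').map pvKey)) (fun k => k) := by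
            rw [PySem.List.mem_sorted, PySem.Set.mem_ofList]
            exact List.mem_map_of_mem List.mem_cons_self
          rw [hcats] at this
          exact absurd this (List.not_mem_nil)
  | cons c ds =>
      rw [hcats] at hcne
      have htl : pvTail (PySem.List.sorted res pvKey) "" (c :: ds)
          = pvChunks (PySem.List.sorted res pvKey) (c :: ds) :=
        pv_tail_empty_last _ _ _ (hcne c List.mem_cons_self)
          (fun c2 hc2 => hcne c2 (List.mem_cons_of_mem _ hc2))
      rw [htl, String.empty_append]
      rfl

theorem html_table_out_changed : Claim_changed_html_table_out := by
  unfold Claim_changed_html_table_out; decide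

theorem html_table_out_tight : Claim_exact_html_table_out := by
  intro res _ _ hd
  subst hd
  decide
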